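-- pv_equiv track=rewrite | github.com/hiramepifanio/ranking-de-acoes-py | leitor.py | rankEmpresasByItemPositivofirst
-- ===== SOURCE A (Python) =====
-- def findIndexDoTitulo(tituloAlvo, titulos):
-- 	index = -1
-- 	for i, titulo in enumerate(titulos):
-- 		if titulo == tituloAlvo:
-- 			index = i
-- 			break
-- 	if index < 0:
-- 		raise Exception("Título inexistente: \"" + tituloAlvo + '\"')
--
-- 	return index
--
-- def rankEmpresasByItemPositivofirst(item, titulos, dados):
-- 	rank = rankEmpresasByItem(item, titulos, dados)
--
-- 	firstPositivo = 0
-- 	for i in range(len(rank)):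
-- 		if dados[rank[i]][findIndexDoTitulo(item, titulos)] > 0:
-- 			firstPositivo = i
-- 			break
--
-- 	rankPositivoFirst = []
-- 	for i in range(firstPositivo, len(rank)):
-- 		rankPositivoFirst.append(rank[i])
-- 	for i in range(firstPositivo - 1, -1, -1):
-- 		rankPositivoFirst.append(rank[i])
--
-- 	return rankPositivoFirst
--
-- def rankEmpresasByItem(item, titulos, dados):
-- 	col = findIndexDoTitulo(item, titulos)
-- 	rank = []
-- 	for i, empresa in enumerate(dados):
-- 		rank.append(i)
-- 	for i in range(len(dados)):
-- 		indexMin = i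
-- 		for j in range(i + 1, len(dados)):
-- 			if dados[rank[j]][col] < dados[rank[indexMin]][col]:
-- 				indexMin = j
-- 		rank[i], rank[indexMin] = rank[indexMin], rank[i]
--
-- 	return rank
-- ===== SOURCE B (Python) =====
-- # B: different decomposition end to end: the column is found with list.index, the
-- # selection sort is re-expressed as repeated extraction from a shrinking "remaining"
-- # list (swap-back preserved, so the tie order matches A's in-place swaps), and the
-- # pivot-rotation of A becomes two order-preserving filters of the sorted rank.
-- def rankEmpresasByItemPositivofirst(item, titulos, dados):
-- 	col = titulos.index(item)
-- 	remaining = list(range(len(dados)))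
-- 	rank = []
-- 	while remaining:
-- 		m = 0
-- 		for j in range(1, len(remaining)):
-- 			if dados[remaining[j]][col] < dados[remaining[m]][col]:
-- 				m = j
-- 		rank.append(remaining[m])
-- 		remaining[m] = remaining[0]
-- 		remaining = remaining[1:]
-- 	positives = [r for r in rank if dados[r][col] > 0]
-- 	if not positives:
-- 		return rank
-- 	return positives + [r for r in reversed(rank) if dados[r][col] <= 0]
-- ===== Notes on version B (the rewrite author's own statement) =====
-- stated objective: alternative
-- what changed: The sort is re-expressed as repeated extraction from a shrinking remaining list (with the same swap-back, preserving A's tie order) instead of in-place index-loop selection sort, and A's pivot-search plus two rotation loops become two order-preserving filters of the sorted rank.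
import Mathlib
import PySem

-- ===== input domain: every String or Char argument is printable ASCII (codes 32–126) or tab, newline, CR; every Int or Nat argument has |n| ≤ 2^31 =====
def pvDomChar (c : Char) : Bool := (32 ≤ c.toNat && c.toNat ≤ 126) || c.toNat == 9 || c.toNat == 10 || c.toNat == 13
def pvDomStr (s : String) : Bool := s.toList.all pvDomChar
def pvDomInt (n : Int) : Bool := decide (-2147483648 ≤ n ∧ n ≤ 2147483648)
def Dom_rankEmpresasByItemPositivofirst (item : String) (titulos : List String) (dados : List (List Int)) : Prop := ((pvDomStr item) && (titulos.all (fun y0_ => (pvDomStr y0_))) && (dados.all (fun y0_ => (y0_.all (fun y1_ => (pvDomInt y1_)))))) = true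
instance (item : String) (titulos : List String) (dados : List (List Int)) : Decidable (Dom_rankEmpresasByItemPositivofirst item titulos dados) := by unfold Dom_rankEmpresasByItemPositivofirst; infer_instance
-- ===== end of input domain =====

-- B re-decomposes the whole pipeline (list.index, extraction-based selection sort on a
-- shrinking list, filters instead of pivot rotation); same return value on Pre_.

-- ===== PORT A =====
-- Python raise → none, otherwise some index (first enumerate hit, else -1 then the raise).
def findIndexDoTitulo (tituloAlvo : String) (titulos : List String) : Option Int :=
  let found := (PySem.List.enumerate titulos 0).find? (fun p => p.2 == tituloAlvo)
  let index : Int := match found with | some p => p.1 | none => -1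
  if index < 0 then none else some index

-- dados[r][col]; exact for in-range indices (out-of-range = Python IndexError, excluded by Pre_)
def pvVal (dados : List (List Int)) (col : Int) (r : Int) : Int :=
  (PySem.List.pyGet? ((PySem.List.pyGet? dados r).getD []) col).getD 0

-- rank[i], rank[indexMin] = rank[indexMin], rank[i]  (loop indices are the nonnegative
-- range(...) counters, so rank[j] is ported as rank.getD j 0, exact while j < len rank)
def pvSwap (rank : List Int) (i m : Nat) : List Int :=
  (rank.set i (rank.getD m 0)).set m (rank.getD i 0)

-- inner loop: for j in range(i+1, len(dados)): if dados[rank[j]][col] < dados[rank[indexMin]][col]: indexMin = j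
def pvSelectMin (v : Int → Int) (rank : List Int) (i n : Nat) : Nat :=
  (List.range' (i+1) (n - (i+1))).foldl
    (fun indexMin j => if v (rank.getD j 0) < v (rank.getD indexMin 0) then j else indexMin) i

def rankEmpresasByItem (item : String) (titulos : List String) (dados : List (List Int)) : List Int :=
  match findIndexDoTitulo item titulos with
  | none => []   -- Python raises inside findIndexDoTitulo
  | some col =>
    let rank := (PySem.List.enumerate dados 0).foldl (fun r p => r ++ [p.1]) []
    (List.range dados.length).foldl
      (fun rank i => pvSwap rank i (pvSelectMin (pvVal dados col) rank i dados.length)) rank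

-- for i in range(len(rank)): if dados[rank[i]][findIndexDoTitulo(item,titulos)] > 0: firstPositivo = i; break
def pvFirstPositivo (v : Int → Int) (rank : List Int) : Nat :=
  match (List.range rank.length).find? (fun i => decide (0 < v (rank.getD i 0))) with
  | some i => i
  | none => 0

def rankEmpresasByItemPositivofirst (item : String) (titulos : List String) (dados : List (List Int)) : List Int :=
  match findIndexDoTitulo item titulos with
  | none => []   -- Python raises
  | some col =>
    let rank := rankEmpresasByItem item titulos dados
    let firstPositivo := pvFirstPositivo (pvVal dados col) rank
    -- for i in range(firstPositivo, len(rank)): append rank[i]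
    let rankPositivoFirst :=
      (List.range' firstPositivo (rank.length - firstPositivo)).foldl
        (fun acc i => acc ++ [rank.getD i 0]) []
    -- for i in range(firstPositivo-1, -1, -1): append rank[i]  (descending = reverse of range firstPositivo)
    ((List.range firstPositivo).reverse).foldl (fun acc i => acc ++ [rank.getD i 0]) rankPositivoFirst

-- ===== PORT B =====
-- dados[r][col] with col the Nat returned by titulos.index (same Python indexing as A's rows)
def bVal (dados : List (List Int)) (col : Nat) (r : Int) : Int :=
  (PySem.List.pyGet? ((PySem.List.pyGet? dados r).getD []) (col : Int)).getD 0

-- the inner for-loop of B: m = 0; for j in range(1, len(remaining)): if key(l[j]) < key(l[m]): m = j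
def bArgmin (v : Int → Int) (l : List Int) : Nat :=
  (List.range' 1 (l.length - 1)).foldl
    (fun m j => if v (l.getD j 0) < v (l.getD m 0) then j else m) 0

-- the while-loop of B: extract l[m], write l[0] over position m, continue on l[1:]
def bSelSort (v : Int → Int) (l : List Int) : List Int :=
  if hnil : l = [] then []
  else
    let m := bArgmin v l
    l.getD m 0 :: bSelSort v ((l.set m (l.getD 0 0)).drop 1)
termination_by l.length
decreasing_by
  have : l.length ≠ 0 := fun h0 => hnil (List.eq_nil_of_length_eq_zero h0)
  simp; omega

def rankEmpresasByItemPositivofirst_alt (item : String) (titulos : List String) (dados : List (List Int)) : List Int :=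
  match PySem.List.index? titulos item with
  | none => []   -- Python raises ValueError in titulos.index
  | some col =>
    let rank := bSelSort (bVal dados col) (PySem.List.pyRange 0 dados.length 1)
    let positives := rank.filter (fun r => decide (0 < bVal dados col r))
    if positives.isEmpty then rank
    else positives ++ rank.reverse.filter (fun r => decide (bVal dados col r ≤ 0))

-- ===== PRECONDITION & SPEC =====
-- Pre_ excludes exactly the inputs on which Python A raises: item absent from titulos
-- (explicit Exception) or some row shorter than the item's column (IndexError).
def Pre_rankEmpresasByItemPositivofirst (item : String) (titulos : List String) (dados : List (List Int)) : Prop :=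
  item ∈ titulos ∧ ∀ row ∈ dados, titulos.idxOf item < row.length
instance (item : String) (titulos : List String) (dados : List (List Int)) : Decidable (Pre_rankEmpresasByItemPositivofirst item titulos dados) := by unfold Pre_rankEmpresasByItemPositivofirst; infer_instance

def pvWitness_rankEmpresasByItemPositivofirst : String × List String × List (List Int) :=
  ("a", ["a", "b"], [[1, 0], [-2, 5], [0, 3]])

def Spec_rankEmpresasByItemPositivofirst (item : String) (titulos : List String) (dados : List (List Int)) (out : List Int) : Prop := out = rankEmpresasByItemPositivofirst_alt item titulos dados
instance (item : String) (titulos : List String) (dados : List (List Int)) (out : List Int) : Decidable (Spec_rankEmpresasByItemPositivofirst item titulos dados out) := by unfold Spec_rankEmpresasByItemPositivofirst; infer_instance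

-- ===== CLAIM (what is proved, stated in full; the proofs are below) =====
def Claim_equal_rankEmpresasByItemPositivofirst : Prop := ∀ (item : String) (titulos : List String) (dados : List (List Int)), Dom_rankEmpresasByItemPositivofirst item titulos dados → Pre_rankEmpresasByItemPositivofirst item titulos dados → Spec_rankEmpresasByItemPositivofirst item titulos dados (rankEmpresasByItemPositivofirst item titulos dados)

-- ===== LEMMAS AND PROOFS =====

theorem pv_foldl_append_map {α β : Type} (f : α → β) :
    ∀ (l : List α) (init : List β),
      l.foldl (fun acc i => acc ++ [f i]) init = init ++ l.map f := by
  intro l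
  induction l with
  | nil => simp
  | cons x xs ih => intro init; simp [List.foldl_cons, ih]

-- the argmin fold: result is the start or a scanned index, and is minimal
theorem pv_foldl_min {g : Nat → Int} :
    ∀ (l : List Nat) (a : Nat),
      ((l.foldl (fun m j => if g j < g m then j else m) a) = a ∨
        (l.foldl (fun m j => if g j < g m then j else m) a) ∈ l) ∧
      g (l.foldl (fun m j => if g j < g m then j else m) a) ≤ g a ∧
      ∀ j ∈ l, g (l.foldl (fun m j => if g j < g m then j else m) a) ≤ g j := by
  intro l
  induction l with
  | nil => intro a; simp
  | cons x xs ih =>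
    intro a
    by_cases h : g x < g a
    · have := ih x
      simp only [List.foldl_cons, if_pos h]
      refine ⟨?_, ?_, ?_⟩
      · rcases this.1 with h1 | h1
        · exact Or.inr (by simp [h1])
        · exact Or.inr (by simp [h1])
      · exact le_trans this.2.1 (le_of_lt h)
      · intro j hj
        rcases List.mem_cons.mp hj with rfl | hj
        · exact this.2.1
        · exact this.2.2 j hj
    · have := ih a
      simp only [List.foldl_cons, if_neg h]
      refine ⟨?_, this.2.1, ?_⟩
      · rcases this.1 with h1 | h1
        · exact Or.inl h1
        · exact Or.inr (List.mem_cons_of_mem _ h1)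
      · intro j hj
        rcases List.mem_cons.mp hj with rfl | hj
        · exact le_trans this.2.1 (le_of_not_gt h)
        · exact this.2.2 j hj

theorem pv_selectMin_spec (v : Int → Int) (rank : List Int) (i n : Nat) (hi : i < n) :
    i ≤ pvSelectMin v rank i n ∧ pvSelectMin v rank i n < n ∧
    ∀ j, i ≤ j → j < n →
      v (rank.getD (pvSelectMin v rank i n) 0) ≤ v (rank.getD j 0) := by
  unfold pvSelectMin
  have h := pv_foldl_min (g := fun j => v (rank.getD j 0)) (List.range' (i+1) (n - (i+1))) i
  set m := (List.range' (i+1) (n - (i+1))).foldl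
    (fun m j => if v (rank.getD j 0) < v (rank.getD m 0) then j else m) i with hm
  have hmem : ∀ j, j ∈ List.range' (i+1) (n - (i+1)) ↔ i + 1 ≤ j ∧ j < n := by
    intro j
    rw [List.mem_range'_1]
    omega
  refine ⟨?_, ?_, ?_⟩
  · rcases h.1 with h1 | h1
    · omega
    · have := (hmem m).mp h1; omega
  · rcases h.1 with h1 | h1
    · omega
    · have := (hmem m).mp h1; omega
  · intro j hij hjn
    by_cases hji : j = i
    · subst hji; exact h.2.1
    · exact h.2.2 j ((hmem j).mpr (by omega))

theorem pv_getD_swap (r : List Int) (i m k : Nat) (hi : i < r.length) (hm : m < r.length) :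
    (pvSwap r i m).getD k 0 =
      if k = m then r.getD i 0 else if k = i then r.getD m 0 else r.getD k 0 := by
  unfold pvSwap
  rcases eq_or_ne k m with rfl | hkm
  · simp [List.getD_eq_getElem?_getD, hm]
  · rcases eq_or_ne k i with rfl | hki
    · simp [List.getD_eq_getElem?_getD, hi, hkm, Ne.symm hkm]
    · simp [List.getD_eq_getElem?_getD, hkm, hki, Ne.symm hkm, Ne.symm hki]

theorem pv_swap_length (r : List Int) (i m : Nat) : (pvSwap r i m).length = r.length := by
  simp [pvSwap]

-- one selection-sort step preserves the sortedness invariant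
theorem pv_step_inv (v : Int → Int) (n i : Nat) (r : List Int)
    (hlen : r.length = n) (hi : i < n)
    (hinv : ∀ j k, j < i → j < k → k < n → v (r.getD j 0) ≤ v (r.getD k 0)) :
    (pvSwap r i (pvSelectMin v r i n)).length = n ∧
    ∀ j k, j < i + 1 → j < k → k < n →
      v ((pvSwap r i (pvSelectMin v r i n)).getD j 0) ≤
      v ((pvSwap r i (pvSelectMin v r i n)).getD k 0) := by
  obtain ⟨him, hmn, hmin⟩ := pv_selectMin_spec v r i n hi
  set m := pvSelectMin v r i n with hmdef
  have hil : i < r.length := by omega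
  have hml : m < r.length := by omega
  refine ⟨by simp [pv_swap_length, hlen], ?_⟩
  intro j k hj hjk hk
  rw [pv_getD_swap r i m j hil hml, pv_getD_swap r i m k hil hml]
  have hval : ∀ x : Nat,
      (if x = m then r.getD i 0 else if x = i then r.getD m 0 else r.getD x 0)
        = r.getD (if x = m then i else if x = i then m else x) 0 := by
    intro x; split_ifs <;> rfl
  rw [hval j, hval k]
  by_cases hji : j = i
  · have h1 : (if j = m then i else if j = i then m else j) = m := by
      rcases eq_or_ne j m with h | h
      · rw [if_pos h]; omega
      · rw [if_neg h, if_pos hji]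
    rw [h1]
    have h2 : i ≤ (if k = m then i else if k = i then m else k) ∧
        (if k = m then i else if k = i then m else k) < n := by
      split_ifs <;> omega
    exact hmin _ h2.1 h2.2
  · have hjm : j ≠ m := by omega
    rw [if_neg hjm, if_neg hji]
    have h2 : j < (if k = m then i else if k = i then m else k) ∧
        (if k = m then i else if k = i then m else k) < n := by
      split_ifs <;> omega
    exact hinv j _ (by omega) h2.1 h2.2

theorem pv_selsort_inv (v : Int → Int) (n : Nat) (rank0 : List Int) (hlen : rank0.length = n) :
    ∀ t, t ≤ n →
      ((List.range t).foldl (fun rank i => pvSwap rank i (pvSelectMin v rank i n)) rank0).length = n ∧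
      ∀ j k, j < t → j < k → k < n →
        v (((List.range t).foldl (fun rank i => pvSwap rank i (pvSelectMin v rank i n)) rank0).getD j 0) ≤
        v (((List.range t).foldl (fun rank i => pvSwap rank i (pvSelectMin v rank i n)) rank0).getD k 0) := by
  intro t
  induction t with
  | zero =>
    intro _
    refine ⟨by simpa using hlen, ?_⟩
    intro j k hj _ _
    exact absurd hj (by omega)
  | succ t ih =>
    intro ht
    have prev := ih (by omega)
    rw [List.range_succ, List.foldl_append, List.foldl_cons, List.foldl_nil]
    exact pv_step_inv v n t _ prev.1 (by omega) prev.2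

-- find? over the index range agrees with findIdx when a hit exists
theorem pv_find_range_eq (p : Int → Bool) :
    ∀ (l : List Int), (∃ x ∈ l, p x = true) →
      (List.range l.length).find? (fun i => p (l.getD i 0)) = some (l.findIdx p) := by
  intro l
  induction l with
  | nil => intro h; simp at h
  | cons x xs ih =>
    intro h
    by_cases hp : p x = true
    · simp [List.range_succ_eq_map, hp, List.findIdx_cons]
    · have hx : ∃ y ∈ xs, p y = true := by
        rcases h with ⟨y, hy, hpy⟩
        rcases List.mem_cons.mp hy with rfl | hy
        · exact absurd hpy hp
        · exact ⟨y, hy, hpy⟩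
      rw [List.length_cons, List.range_succ_eq_map, List.find?_cons]
      simp only [List.getD_cons_zero, hp]
      rw [List.find?_map]
      simp only [Function.comp_def, List.getD_cons_succ]
      rw [ih hx]
      simp [List.findIdx_cons, hp]

-- sortedness + monotone predicate: the filters are exactly drop/take at findIdx
theorem pv_filter_split (p : Int → Bool) :
    ∀ (l : List Int), List.Pairwise (fun a b => p a = true → p b = true) l →
      l.filter p = l.drop (l.findIdx p) ∧
      l.filter (fun x => !p x) = l.take (l.findIdx p) := by
  intro l
  induction l with
  | nil => intro _; simp
  | cons x xs ih =>
    intro hpw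
    rw [List.pairwise_cons] at hpw
    by_cases hp : p x = true
    · constructor
      · simp [List.findIdx_cons, hp, List.filter_eq_self.mpr (fun y hy => hpw.1 y hy hp)]
      · simp only [List.findIdx_cons, hp, cond_true, List.take_zero]
        rw [List.filter_cons]
        simp only [hp, Bool.not_true]
        exact List.filter_eq_nil_iff.mpr (fun y hy => by simp [hpw.1 y hy hp])
    · have := ih hpw.2
      constructor
      · simp [hp, List.findIdx_cons, this.1]
      · simp [hp, List.findIdx_cons, this.2]

theorem pv_map_getD_range' (l : List Int) (fp : Nat) (h : fp ≤ l.length) :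
    (List.range' fp (l.length - fp)).map (fun i => l.getD i 0) = l.drop fp := by
  apply List.ext_getElem
  · simp
  · intro t h1 h2
    simp only [List.getElem_map, List.getElem_range', List.getElem_drop]
    rw [List.getD_eq_getElem]
    · congr 1; omega
    · simp at h1; omega

theorem pv_map_getD_range (l : List Int) (fp : Nat) (h : fp ≤ l.length) :
    (List.range fp).map (fun i => l.getD i 0) = l.take fp := by
  apply List.ext_getElem
  · simp; omega
  · intro t h1 h2
    have h1' : t < fp := by simpa using h1
    simp only [List.getElem_map, List.getElem_range, List.getElem_take]
    rw [List.getD_eq_getElem _ _ (by omega)]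

-- ===== column lookup: both ports find the same column =====

theorem pv_find_enum (item : String) :
    ∀ (ts : List String) (s : Int), item ∈ ts →
      (PySem.List.enumerate ts s).find? (fun p => p.2 == item)
        = some (s + (ts.idxOf item : Int), item) := by
  intro ts
  induction ts with
  | nil => intro s h; simp at h
  | cons t ts ih =>
    intro s h
    rw [PySem.List.enumerate_cons, List.find?_cons]
    by_cases ht : t = item
    · subst ht
      simp [List.idxOf_cons_self]
    · have hmem : item ∈ ts := by
        rcases List.mem_cons.mp h with h' | h'
        · exact absurd h'.symm ht
        · exact h'
      have hbe : (t == item) = false := beq_eq_false_iff_ne.mpr ht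
      simp only [hbe]
      rw [ih (s + 1) hmem, List.idxOf_cons_ne _ ht]
      congr 2
      push_cast
      ring

theorem pv_findIndex_eq (item : String) (titulos : List String) (h : item ∈ titulos) :
    findIndexDoTitulo item titulos = some (titulos.idxOf item : Int) := by
  unfold findIndexDoTitulo
  rw [pv_find_enum item titulos 0 h]
  simp

theorem pv_index?_eq (item : String) (titulos : List String) (h : item ∈ titulos) :
    PySem.List.index? titulos item = some (titulos.idxOf item) := by
  induction titulos with
  | nil => simp at h
  | cons t ts ih =>
    by_cases ht : t = item
    · subst ht
      rw [PySem.List.index?_cons_self]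
      simp [List.idxOf_cons_self]
    · have hmem : item ∈ ts := by
        rcases List.mem_cons.mp h with h' | h'
        · exact absurd h'.symm ht
        · exact h'
      rw [PySem.List.index?_cons_of_ne ts ht, ih hmem, List.idxOf_cons_ne _ ht]
      rfl

-- ===== A's in-place selection sort = B's extraction selection sort =====

theorem pv_getD_drop (l : List Int) (i t : Nat) :
    (l.drop i).getD t 0 = l.getD (i + t) 0 := by
  simp [List.getD_eq_getElem?_getD, List.getElem?_drop]

-- the accumulator shift underlying 'pvSelectMin = i + bArgmin of the suffix'
theorem pv_argmin_shift (h : Nat → Int) (i : Nat) :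
    ∀ (L : List Nat) (a : Nat),
      L.foldl (fun m t => if h (i + 1 + t) < h m then i + 1 + t else m) (i + a)
        = i + L.foldl (fun m t => if h (i + (1 + t)) < h (i + m) then 1 + t else m) a := by
  intro L
  induction L with
  | nil => intro a; simp
  | cons t L ih =>
    intro a
    simp only [List.foldl_cons]
    by_cases hc : h (i + 1 + t) < h (i + a)
    · rw [if_pos hc, if_pos (by rw [show i + (1+t) = i + 1 + t by omega]; exact hc),
        show i + 1 + t = i + (1 + t) by omega, ih]
    · rw [if_neg hc, if_neg (by rw [show i + (1+t) = i + 1 + t by omega]; exact hc), ih]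

theorem pv_selectMin_eq_bArgmin (v : Int → Int) (r : List Int) (i : Nat)
    (_hi : i < r.length) :
    pvSelectMin v r i r.length = i + bArgmin v (r.drop i) := by
  unfold pvSelectMin bArgmin
  have hlen : (r.drop i).length - 1 = r.length - (i + 1) := by
    simp; omega
  rw [hlen]
  have hr1 : List.range' (i+1) (r.length - (i+1)) =
      (List.range (r.length - (i+1))).map (fun t => i + 1 + t) := by
    rw [List.range'_eq_map_range]
  have hr2 : List.range' 1 (r.length - (i+1)) =
      (List.range (r.length - (i+1))).map (fun t => 1 + t) := by
    rw [List.range'_eq_map_range]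
  rw [hr1, hr2, List.foldl_map, List.foldl_map]
  simp only [pv_getD_drop]
  have := pv_argmin_shift (fun j => v (r.getD j 0)) i (List.range (r.length - (i+1))) 0
  simpa using this

theorem pv_bArgmin_lt (v : Int → Int) (l : List Int) (hl : l ≠ []) :
    bArgmin v l < l.length := by
  unfold bArgmin
  have h := pv_foldl_min (g := fun j => v (l.getD j 0)) (List.range' 1 (l.length - 1)) 0
  have hlen : 0 < l.length := List.length_pos_iff.mpr hl
  rcases h.1 with h1 | h1
  · omega
  · rw [List.mem_range'_1] at h1; omega

-- swap-at-front written as head-extraction plus overwrite-and-tail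
theorem pv_swapFront_eq (s : List Int) (m : Nat) (hs : s ≠ []) :
    (s.set 0 (s.getD m 0)).set m (s.getD 0 0)
      = s.getD m 0 :: (s.set m (s.getD 0 0)).drop 1 := by
  cases s with
  | nil => exact absurd rfl hs
  | cons x xs =>
    cases m with
    | zero => simp
    | succ t => simp

theorem pv_swap_eq_take_swapFront (r : List Int) (i m : Nat) (hi : i < r.length)
    (_hm : i + m < r.length) :
    pvSwap r i (i + m)
      = r.take i ++ ((r.drop i).set 0 (r.getD (i + m) 0)).set m (r.getD i 0) := by
  unfold pvSwap
  have hlen : (r.take i).length = i := List.length_take_of_le (by omega)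
  generalize r.getD (i + m) 0 = a
  generalize r.getD i 0 = b
  conv_lhs => rw [← List.take_append_drop i r]
  rw [List.set_append_right _ _ (by omega), List.set_append_right _ _ (by omega),
    hlen, Nat.sub_self, Nat.add_sub_cancel_left]

-- A's index-loop selection sort equals B's extraction selection sort, suffix by suffix
theorem pv_selsort_eq (v : Int → Int) (n : Nat) :
    ∀ (k i : Nat) (r : List Int), r.length = n → i + k = n →
      (List.range' i k).foldl (fun rank i => pvSwap rank i (pvSelectMin v rank i n)) r
        = r.take i ++ bSelSort v (r.drop i) := by
  intro k
  induction k with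
  | zero =>
    intro i r hr hik
    have : r.drop i = [] := by
      apply List.drop_eq_nil_of_le; omega
    rw [this, bSelSort]
    simp [List.take_of_length_le (by omega : r.length ≤ i)]
  | succ k ih =>
    intro i r hr hik
    have hi : i < n := by omega
    rw [List.range'_succ, List.foldl_cons]
    set s := r.drop i with hs
    have hsne : s ≠ [] := by
      rw [hs]
      intro h0
      have := congrArg List.length h0
      simp at this
      omega
    have hslen : s.length = n - i := by rw [hs]; simp; omega
    set m := bArgmin v s with hmdef
    have hm : m < s.length := pv_bArgmin_lt v s hsne
    have hsel : pvSelectMin v r i n = i + m := by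
      rw [← hr] at hi ⊢
      exact pv_selectMin_eq_bArgmin v r i hi
    rw [hsel, pv_swap_eq_take_swapFront r i m (by omega) (by omega), ← hs]
    have hg0 : r.getD (i + m) 0 = s.getD m 0 := (pv_getD_drop r i m).symm
    have hg1 : r.getD i 0 = s.getD 0 0 := by
      rw [← Nat.add_zero i]; exact (pv_getD_drop r i 0).symm
    rw [hg0, hg1, pv_swapFront_eq s m hsne]
    set w := (s.set m (s.getD 0 0)).drop 1 with hw
    have hwlen : w.length = n - (i + 1) := by rw [hw]; simp; omega
    have hr' : (r.take i ++ s.getD m 0 :: w).length = n := by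
      simp [List.length_take_of_le (by omega : i ≤ r.length)]
      omega
    rw [ih (i+1) _ hr' (by omega)]
    have htk : (r.take i).length = i := List.length_take_of_le (by omega)
    have h1 : (r.take i ++ s.getD m 0 :: w).take (i+1) = r.take i ++ [s.getD m 0] := by
      rw [show i + 1 = (r.take i).length + 1 by omega]
      simp [List.take_append]
    have h2 : (r.take i ++ s.getD m 0 :: w).drop (i+1) = w := by
      rw [show i + 1 = (r.take i).length + 1 by omega]
      simp [List.drop_append]
    rw [h1, h2]
    conv_rhs => rw [bSelSort]
    rw [dif_neg hsne]
    show List.take i r ++ [s.getD m 0] ++ bSelSort v w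
        = List.take i r ++ (s.getD (bArgmin v s) 0
            :: bSelSort v ((s.set (bArgmin v s) (s.getD 0 0)).drop 1))
    rw [← hmdef, ← hw]
    simp

-- initial rank of A (append-fold over enumerate) = B's list(range(n))
theorem pv_init_rank (dados : List (List Int)) :
    (PySem.List.enumerate dados 0).foldl (fun r p => r ++ [p.1]) []
      = PySem.List.pyRange 0 dados.length 1 := by
  rw [pv_foldl_append_map]
  have := PySem.List.map_fst_enumerate dados 0
  simpa using this

-- ===== VERDICT (by name: the statement is the Claim_ definition above) =====
theorem rankEmpresasByItemPositivofirst_spec : Claim_equal_rankEmpresasByItemPositivofirst := by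
  intro item titulos dados _ hpre
  unfold Spec_rankEmpresasByItemPositivofirst
  unfold rankEmpresasByItemPositivofirst rankEmpresasByItemPositivofirst_alt
  obtain ⟨hmem, _⟩ := hpre
  rw [pv_findIndex_eq item titulos hmem, pv_index?_eq item titulos hmem]
  simp only []
  set colN := titulos.idxOf item with hcolN
  set col : Int := (colN : Int) with hcol
  have hvv : bVal dados colN = pvVal dados col := rfl
  set v := pvVal dados col with hv
  -- the two ranks coincide
  have hrank_eq : rankEmpresasByItem item titulos dados
      = bSelSort (bVal dados colN) (PySem.List.pyRange 0 dados.length 1) := by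
    unfold rankEmpresasByItem
    rw [pv_findIndex_eq item titulos hmem, pv_init_rank]
    have hlen : (PySem.List.pyRange 0 (dados.length : Int) 1).length = dados.length := by
      simp [PySem.List.pyRange_zero_nat]
    have := pv_selsort_eq v dados.length dados.length 0 _ hlen (by omega)
    rw [← List.range_eq_range'] at this
    rw [hvv]
    simpa using this
  set rank := rankEmpresasByItem item titulos dados with hrank
  rw [← hrank_eq]
  set p : Int → Bool := fun r => decide (0 < v r) with hp
  -- sortedness of rank
  have hsorted : rank.length = dados.length ∧
      ∀ j k, j < k → k < dados.length → v (rank.getD j 0) ≤ v (rank.getD k 0) := by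
    have hlen0 : ((PySem.List.enumerate dados 0).foldl (fun r p => r ++ [p.1]) ([] : List Int)).length
        = dados.length := by
      rw [pv_foldl_append_map]
      simp [PySem.List.length_enumerate]
    have := pv_selsort_inv v dados.length _ hlen0 dados.length le_rfl
    rw [hrank]
    unfold rankEmpresasByItem
    rw [pv_findIndex_eq item titulos hmem]
    exact ⟨this.1, fun j k hjk hk => this.2 j k (by omega) hjk hk⟩
  have hlen : rank.length = dados.length := hsorted.1
  have hpw : List.Pairwise (fun a b => p a = true → p b = true) rank := by
    rw [List.pairwise_iff_getElem]
    intro a b ha hb hab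
    have := hsorted.2 a b hab (by omega)
    rw [List.getD_eq_getElem _ _ ha, List.getD_eq_getElem _ _ hb] at this
    simp only [hp, decide_eq_true_eq]
    omega
  have hfilters : rank.filter (fun r => decide (0 < bVal dados colN r)) = rank.filter p := by
    rw [hvv]
  by_cases hpos : ∃ x ∈ rank, p x = true
  · -- a positive exists
    have hfp : pvFirstPositivo v rank = rank.findIdx p := by
      unfold pvFirstPositivo
      rw [pv_find_range_eq p rank hpos]
    have hfple : rank.findIdx p ≤ rank.length := List.findIdx_le_length
    have hsplit := pv_filter_split p rank hpw
    have hne : ¬ (rank.filter p).isEmpty = true := by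
      rcases hpos with ⟨x, hx, hpx⟩
      simp only [List.isEmpty_iff]
      intro hnil
      have : x ∈ rank.filter p := List.mem_filter.mpr ⟨hx, hpx⟩
      rw [hnil] at this; simp at this
    have hfilter2 : rank.reverse.filter (fun r => decide (bVal dados colN r ≤ 0)) =
        (rank.filter (fun x => !p x)).reverse := by
      rw [List.filter_reverse]
      congr 1
      apply List.filter_congr
      intro x _
      simp only [hp, hvv]
      by_cases h : 0 < v x
      · simp [h]
      · simp [h, le_of_not_gt h]
    rw [hfilters, if_neg hne, hfilter2, hsplit.1, hsplit.2, hfp]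
    rw [pv_foldl_append_map, pv_foldl_append_map]
    rw [pv_map_getD_range' rank _ hfple]
    rw [List.map_reverse, pv_map_getD_range rank _ hfple]
    simp
  · -- no positive: A's firstPositivo defaults to 0, B returns rank
    have hfp : pvFirstPositivo v rank = 0 := by
      unfold pvFirstPositivo
      have : (List.range rank.length).find? (fun i => decide (0 < v (rank.getD i 0))) = none := by
        apply List.find?_eq_none.mpr
        intro i hi
        rw [List.mem_range] at hi
        simp only [decide_eq_true_eq]
        intro hgt
        refine hpos ⟨rank.getD i 0, ?_, by simp only [hp, decide_eq_true_eq]; exact hgt⟩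
        rw [List.getD_eq_getElem _ _ hi]
        exact List.getElem_mem _
      rw [this]
    have hempty : (rank.filter (fun r => decide (0 < bVal dados colN r))).isEmpty = true := by
      rw [hfilters]
      simp only [List.isEmpty_iff]
      apply List.filter_eq_nil_iff.mpr
      intro x hx
      simp only [hp, decide_eq_true_eq]
      intro hgt
      exact hpos ⟨x, hx, by simp only [hp, decide_eq_true_eq]; exact hgt⟩
    rw [hempty, if_pos rfl, hfp]
    simp only [List.range_zero, List.reverse_nil, List.foldl_nil]
    rw [pv_foldl_append_map]
    rw [pv_map_getD_range' rank 0 (by omega)]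
    simp
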